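-- pv_equiv track=rewrite | github.com/muneebRC/Updater | updater.py | get_app_name
-- ===== SOURCE A (Python) =====
-- def get_app_name(src):
--     app_name = []
--     for i in reversed(src):
--         if i == '\\':
--             break
--         else:
--             app_name.append(i)
--     return ''.join(reversed(app_name))
-- ===== SOURCE B (Python) =====
-- def get_app_name(src):
--     return src[src.rfind('\\') + 1:]
-- ===== Notes on version B (the rewrite author's own statement) =====
-- stated objective: idiomatic
-- what changed: Replaces the reverse-iterate-accumulate-then-reverse character loop with a single rfind of the last backslash followed by one slice.
import Mathlib
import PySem

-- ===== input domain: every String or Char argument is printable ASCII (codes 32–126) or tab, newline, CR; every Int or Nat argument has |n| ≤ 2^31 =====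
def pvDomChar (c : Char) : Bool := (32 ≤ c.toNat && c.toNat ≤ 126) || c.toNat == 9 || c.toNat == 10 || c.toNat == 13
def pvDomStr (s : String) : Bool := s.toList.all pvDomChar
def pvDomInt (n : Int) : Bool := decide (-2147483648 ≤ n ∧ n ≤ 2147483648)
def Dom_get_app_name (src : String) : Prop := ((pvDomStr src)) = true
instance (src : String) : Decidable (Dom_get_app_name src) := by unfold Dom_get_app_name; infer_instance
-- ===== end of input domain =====

-- B replaces A's reverse-iterate-accumulate-then-reverse loop with rfind of the last backslash plus one slice (idiomatic; same cost).

-- ===== PORT A =====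
-- 'for i in reversed(src): if i == '\\': break; else append' — loop with break, accumulator app_name
def getAppNameLoop : List Char → List Char → List Char
  | [], acc => acc
  | c :: rest, acc => if c = '\\' then acc else getAppNameLoop rest (acc ++ [c])

def get_app_name (src : String) : String :=
  String.ofList (getAppNameLoop src.toList.reverse []).reverse

-- ===== PORT B =====
def get_app_name_alt (src : String) : String :=
  PySem.Str.slice src (some (PySem.Str.rfind src "\\" + 1)) none

-- ===== PRECONDITION & SPEC =====
def Spec_get_app_name (src : String) (out : String) : Prop := out = get_app_name_alt src
instance (src : String) (out : String) : Decidable (Spec_get_app_name src out) := by unfold Spec_get_app_name; infer_instance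

-- ===== CLAIM (what is proved, stated in full; the proofs are below) =====
def Claim_equal_get_app_name : Prop := ∀ (src : String), Dom_get_app_name src → Spec_get_app_name src (get_app_name src)

-- ===== LEMMAS AND PROOFS =====

theorem getAppNameLoop_eq (xs acc : List Char) :
    getAppNameLoop xs acc = acc ++ xs.takeWhile (fun c => !(c = '\\')) := by
  induction xs generalizing acc with
  | nil => simp [getAppNameLoop]
  | cons c rest ih =>
    by_cases h : c = '\\' <;> simp [getAppNameLoop, h, ih]

theorem rfind_go_le (s sub : List Char) (j : Nat) :
    PySem.Chars.rfind.go s sub j ≤ (j : Int) := by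
  induction j with
  | zero => simp [PySem.Chars.rfind.go]; split <;> omega
  | succ j ih =>
    simp only [PySem.Chars.rfind.go]
    split
    · omega
    · exact le_trans ih (by push_cast; omega)

theorem neg_one_le_rfind_go (s sub : List Char) (j : Nat) :
    (-1 : Int) ≤ PySem.Chars.rfind.go s sub j := by
  induction j with
  | zero => simp [PySem.Chars.rfind.go]; split <;> omega
  | succ j ih =>
    simp only [PySem.Chars.rfind.go]
    split
    · omega
    · exact ih

theorem rfind_go_append (l : List Char) (c d : Char) (j : Nat) (hj : j < l.length) :
    PySem.Chars.rfind.go (l ++ [c]) [d] j = PySem.Chars.rfind.go l [d] j := by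
  have hdrop : ∀ k : Nat, k < l.length →
      [d].isPrefixOf (List.drop k (l ++ [c])) = [d].isPrefixOf (List.drop k l) := by
    intro k hk
    rw [List.drop_append_of_le_length (by omega)]
    rcases h : List.drop k l with _ | ⟨x, t⟩
    · have : (List.drop k l).length = l.length - k := List.length_drop ..
      rw [h] at this; simp at this; omega
    · simp [List.isPrefixOf]
  induction j with
  | zero =>
    have h0 := hdrop 0 (by omega)
    simp only [List.drop_zero] at h0
    simp only [PySem.Chars.rfind.go, h0]
  | succ j ih =>
    simp only [PySem.Chars.rfind.go]
    rw [hdrop (j + 1) hj, ih (by omega)]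

theorem rfind_snoc (l : List Char) (c d : Char) :
    PySem.Chars.rfind (l ++ [c]) [d] =
      if c = d then (l.length : Int) else PySem.Chars.rfind l [d] := by
  unfold PySem.Chars.rfind
  rcases l with _ | ⟨x, t⟩
  · simp only [List.nil_append, List.length_cons, List.length_nil]
    simp [PySem.Chars.rfind.go, List.isPrefixOf, beq_iff_eq]
    by_cases h : c = d
    · simp [h]
    · simp [h, Ne.symm h]
  · have hlen : (x :: t ++ [c]).length = t.length + 2 := by simp
    rw [hlen]
    simp only [PySem.Chars.rfind.go, List.length_cons]
    have h1 : [d].isPrefixOf (List.drop (t.length + 1 + 1) (x :: t ++ [c])) = false := by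
      rw [List.drop_of_length_le (by simp)]; rfl
    have h2 : List.drop (t.length + 1) (x :: t ++ [c]) = [c] := by
      have : (t.length + 1) = (x :: t).length := by simp
      rw [this, List.drop_append_of_le_length (le_refl _), List.drop_length]; simp
    have h3 : [d].isPrefixOf (List.drop (t.length + 1) (x :: t)) = false := by
      rw [List.drop_of_length_le (by simp)]; rfl
    rw [h1, h2, h3]
    simp only [Bool.false_eq_true, if_false, List.isPrefixOf]
    by_cases h : c = d
    · simp [h]
    · simp only [Ne.symm h, h, Bool.and_true, beq_iff_eq, if_false]
      exact rfind_go_append (x :: t) c d t.length (by simp)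

theorem rfind_lt_length (l : List Char) (d : Char) :
    PySem.Chars.rfind l [d] < (l.length : Int) := by
  unfold PySem.Chars.rfind
  rcases l with _ | ⟨x, t⟩
  · simp [PySem.Chars.rfind.go, List.isPrefixOf]
  · simp only [List.length_cons, PySem.Chars.rfind.go]
    have h1 : [d].isPrefixOf (List.drop (t.length + 1) (x :: t)) = false := by
      rw [List.drop_of_length_le (by simp)]; rfl
    rw [h1]
    simp only [Bool.false_eq_true, if_false]
    have := rfind_go_le (x :: t) [d] t.length
    omega

theorem main_list (l : List Char) :
    (getAppNameLoop l.reverse []).reverse =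
      PySem.List.slice l (some (PySem.Chars.rfind l ['\\'] + 1)) none := by
  induction l using List.reverseRecOn with
  | nil => simp [getAppNameLoop, PySem.List.slice]
  | append_singleton l c ih =>
    rw [List.reverse_append]
    simp only [List.reverse_singleton, List.singleton_append]
    rw [rfind_snoc]
    by_cases h : c = '\\'
    · rw [if_pos h]
      rw [PySem.List.slice_from _ (by omega)]
      simp [getAppNameLoop, h, List.drop_of_length_le]
    · rw [if_neg h]
      have hlb := neg_one_le_rfind_go l ['\\'] l.length
      have hub := rfind_lt_length l '\\'
      unfold PySem.Chars.rfind at *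
      rw [PySem.List.slice_from _ (by omega)]
      rw [List.drop_append_of_le_length] <;>
        [skip; omega]
      simp only [getAppNameLoop, h, if_false]
      rw [getAppNameLoop_eq, List.nil_append, List.reverse_append]
      rw [getAppNameLoop_eq, List.nil_append] at ih
      rw [PySem.List.slice_from _ (by omega)] at ih
      simp [ih]

-- ===== VERDICT (by name: the statement is the Claim_ definition above) =====
theorem get_app_name_spec : Claim_equal_get_app_name := by
  intro src _
  unfold Spec_get_app_name get_app_name get_app_name_alt
  apply String.toList_inj.mp
  simp only [String.toList_ofList, PySem.Str.toList_slice, PySem.Str.rfind_eq,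
    PySem.Chars.slice_eq_listSlice]
  have : ("\\" : String).toList = ['\\'] := rfl
  rw [this]
  exact main_list src.toList
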